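-- pv_equiv track=rewrite | github.com/Kyo-72/bachelor_thesis | bit_search.py | desired_input_set
-- ===== SOURCE A (Python) =====
-- def desired_input_set(input_set, output_state):
--     res_input_set = []
--     n = len(input_set)
--     for bit in range(1 << n):
--         #使うインプットのindex
--         ans_state = 0
--         for i in range(n):
--             if(bit & (1 << i)):
--                 ans_state = ans_state^input_set[i]
--
--         if(ans_state == output_state):
--             res_input_set = [i for i in range(n)  if bit & (1 << i)]
--
--     return res_input_set
-- ===== SOURCE B (Python) =====
-- def desired_input_set(input_set, output_state):
--     # Recursive include-first search from the highest index: the first subset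
--     # found is the one with the numerically largest index bitmask, which is
--     # exactly the subset A's full enumeration keeps last.
--     def search(i, acc):
--         if i == 0:
--             return [] if acc == output_state else None
--         r = search(i - 1, acc ^ input_set[i - 1])
--         if r is not None:
--             return r + [i - 1]
--         return search(i - 1, acc)
--     r = search(len(input_set), 0)
--     return r if r is not None else []
-- ===== Notes on version B (the rewrite author's own statement) =====
-- stated objective: faster
-- what changed: Replaced the full enumeration of all 2^n bitmasks (keeping the last match and recomputing each subset xor with an inner O(n) scan) by a recursive include-first search from the highest index that accumulates the xor along the recursion and returns the first subset found, which is exactly the maximal-bitmask solution A keeps last.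
import Mathlib
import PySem

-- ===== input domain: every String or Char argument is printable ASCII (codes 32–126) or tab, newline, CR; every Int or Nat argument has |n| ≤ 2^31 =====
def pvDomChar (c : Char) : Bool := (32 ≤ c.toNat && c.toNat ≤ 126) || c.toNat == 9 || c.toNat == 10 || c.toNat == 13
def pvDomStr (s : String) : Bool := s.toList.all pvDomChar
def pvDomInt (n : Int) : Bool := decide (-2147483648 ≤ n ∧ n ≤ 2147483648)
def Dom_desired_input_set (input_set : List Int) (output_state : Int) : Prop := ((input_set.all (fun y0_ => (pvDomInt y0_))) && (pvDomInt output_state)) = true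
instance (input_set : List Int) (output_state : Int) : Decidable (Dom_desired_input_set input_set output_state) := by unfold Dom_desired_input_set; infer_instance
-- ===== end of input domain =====

-- B replaces A's full enumeration of all 2^n bitmasks (keeping the last match,
-- recomputing the subset xor from scratch for each mask) by a recursive
-- include-first search from the highest index that accumulates the xor and
-- returns the first subset found (= the one with the largest bitmask).

-- ===== PORT A =====
-- range(1 << n) and range(n) have nonnegative bounds, so List.range is exact;
-- input_set[i] always has 0 ≤ i < len(input_set), so getD never hits its default.
def desired_input_set (input_set : List Int) (output_state : Int) : List Int :=
  let n := input_set.length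
  (List.range (2 ^ n)).foldl
    (fun res bit =>
      let ans : Int := (List.range n).foldl
        (fun a i => if bit &&& (1 <<< i) ≠ 0 then PySem.Int.bxor a (input_set.getD i 0) else a) 0
      if ans = output_state then
        ((List.range n).filter (fun i => bit &&& (1 <<< i) ≠ 0)).map Int.ofNat
      else res)
    []

-- ===== PORT B =====
-- transliteration of Source B's recursive helper `search(i, acc)`
def pvAltSearch (input_set : List Int) (output_state : Int) : Nat → Int → Option (List Int)
  | 0, acc => if acc = output_state then some [] else none
  | i + 1, acc =>
    match pvAltSearch input_set output_state i (PySem.Int.bxor acc (input_set.getD i 0)) with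
    | some r => some (r ++ [Int.ofNat i])
    | none => pvAltSearch input_set output_state i acc

def desired_input_set_alt (input_set : List Int) (output_state : Int) : List Int :=
  (pvAltSearch input_set output_state input_set.length 0).getD []

-- ===== PRECONDITION & SPEC =====
def Spec_desired_input_set (input_set : List Int) (output_state : Int) (out : List Int) : Prop := out = desired_input_set_alt input_set output_state
instance (input_set : List Int) (output_state : Int) (out : List Int) : Decidable (Spec_desired_input_set input_set output_state out) := by unfold Spec_desired_input_set; infer_instance

-- ===== CLAIM (what is proved, stated in full; the proofs are below) =====
def Claim_equal_desired_input_set : Prop := ∀ (input_set : List Int) (output_state : Int), Dom_desired_input_set input_set output_state → Spec_desired_input_set input_set output_state (desired_input_set input_set output_state)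

-- ===== LEMMAS AND PROOFS =====

-- evaluation of PySem.Int.bxor on the two Int constructors
lemma pv_bxor_ofNat_ofNat (m n : Nat) :
    PySem.Int.bxor (Int.ofNat m) (Int.ofNat n) = Int.ofNat (m ^^^ n) := by
  simp [PySem.Int.bxor]

lemma pv_bxor_ofNat_negSucc (m n : Nat) :
    PySem.Int.bxor (Int.ofNat m) (Int.negSucc n) = Int.negSucc (m ^^^ n) := by
  simp [PySem.Int.bxor, Int.negSucc_eq]
  rw [if_neg (by omega)]
  omega

lemma pv_bxor_negSucc_ofNat (m n : Nat) :
    PySem.Int.bxor (Int.negSucc m) (Int.ofNat n) = Int.negSucc (m ^^^ n) := by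
  rw [PySem.Int.bxor_comm, pv_bxor_ofNat_negSucc, Nat.xor_comm]

lemma pv_bxor_negSucc_negSucc (m n : Nat) :
    PySem.Int.bxor (Int.negSucc m) (Int.negSucc n) = Int.ofNat (m ^^^ n) := by
  simp [PySem.Int.bxor, Int.negSucc_eq]
  rw [if_neg (by omega), if_neg (by omega)]

lemma pv_bxor_assoc (a b c : Int) :
    PySem.Int.bxor (PySem.Int.bxor a b) c = PySem.Int.bxor a (PySem.Int.bxor b c) := by
  cases a <;> cases b <;> cases c <;>
    simp only [pv_bxor_ofNat_ofNat, pv_bxor_ofNat_negSucc, pv_bxor_negSucc_ofNat,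
      pv_bxor_negSucc_negSucc, Nat.xor_assoc]

-- subsets of {0,…,i-1} as ascending index lists, in decreasing-bitmask order
def pvSubs : Nat → List (List Nat)
  | 0 => [[]]
  | i + 1 => (pvSubs i).map (· ++ [i]) ++ pvSubs i

def pvXorAcc (input_set : List Int) (acc : Int) (s : List Nat) : Int :=
  s.foldl (fun a j => PySem.Int.bxor a (input_set.getD j 0)) acc

lemma pvXorAcc_xor (input_set : List Int) (v : Int) (s : List Nat) : ∀ acc,
    pvXorAcc input_set (PySem.Int.bxor acc v) s = PySem.Int.bxor (pvXorAcc input_set acc s) v := by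
  induction s with
  | nil => intro acc; simp [pvXorAcc]
  | cons j s ih =>
    intro acc
    simp only [pvXorAcc, List.foldl_cons] at *
    rw [show PySem.Int.bxor (PySem.Int.bxor acc v) (input_set.getD j 0)
          = PySem.Int.bxor (PySem.Int.bxor acc (input_set.getD j 0)) v by
      rw [pv_bxor_assoc, pv_bxor_assoc, PySem.Int.bxor_comm v]]
    exact ih _

lemma pv_keep_last {α β : Type} (p : α → Prop) [DecidablePred p] (f : α → β) (init : β)
    (l : List α) :
    l.foldl (fun r b => if p b then f b else r) init
      = ((l.reverse.find? (fun b => decide (p b))).map f).getD init := by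
  induction l using List.reverseRecOn with
  | nil => simp
  | append_singleton ys x ih =>
    rw [List.foldl_append, List.reverse_append]
    simp only [List.foldl_cons, List.foldl_nil, List.reverse_singleton, List.singleton_append,
      List.find?_cons]
    by_cases h : p x
    · simp [h]
    · simp only [h, if_false]
      rw [ih]
      simp

lemma pv_foldl_filter {α β : Type} (p : α → Bool) (f : β → α → β) :
    ∀ (l : List α) (init : β),
      l.foldl (fun a i => if p i then f a i else a) init = (l.filter p).foldl f init := by
  intro l
  induction l with
  | nil => intro init; simp
  | cons x l ih =>
    intro init
    by_cases h : p x <;> simp [h, ih]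

lemma pv_find?_congr {α : Type} (p q : α → Bool) :
    ∀ (l : List α), (∀ a ∈ l, p a = q a) → l.find? p = l.find? q := by
  intro l
  induction l with
  | nil => intro _; rfl
  | cons x l ih =>
    intro h
    rw [List.find?_cons, List.find?_cons, h x (List.mem_cons_self), ih (fun a ha => h a (List.mem_cons_of_mem _ ha))]

lemma pv_bit_eq_testBit (bit j : Nat) :
    (decide (bit &&& (1 <<< j) ≠ 0)) = bit.testBit j := by
  rw [Nat.one_shiftLeft, Nat.and_two_pow]
  cases h : bit.testBit j <;> simp [Nat.pow_eq_zero]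

def pvIdx (n bit : Nat) : List Nat := (List.range n).filter (fun j => bit.testBit j)

lemma pvIdx_add (n i m : Nat) (h1 : m < 2 ^ i) (h2 : i < n) :
    pvIdx n (2 ^ i + m) = pvIdx n m ++ [i] := by
  have hsplit : List.range n = List.range (i + 1) ++ (List.range (n - (i + 1))).map ((i + 1) + ·) := by
    have : n = (i + 1) + (n - (i + 1)) := by omega
    conv_lhs => rw [this]
    exact List.range_add
  have hhigh : ∀ x : Nat, x < 2 ^ (i + 1) → ∀ k : Nat, ¬ x.testBit ((i + 1) + k) = true := by
    intro x hx k
    have : x < 2 ^ ((i + 1) + k) := lt_of_lt_of_le hx (Nat.pow_le_pow_right (by norm_num) (by omega))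
    simp [Nat.testBit_lt_two_pow this]
  have hm1 : m < 2 ^ (i + 1) := lt_of_lt_of_le h1 (Nat.pow_le_pow_right (by norm_num) (by omega))
  have hm2 : 2 ^ i + m < 2 ^ (i + 1) := by rw [pow_succ]; omega
  unfold pvIdx
  rw [hsplit, List.filter_append, List.filter_append, List.range_succ,
    List.filter_append, List.filter_append]
  have e1 : (List.range i).filter (fun j => (2 ^ i + m).testBit j)
      = (List.range i).filter (fun j => m.testBit j) := by
    apply List.filter_congr
    intro j hj
    exact Nat.testBit_two_pow_add_gt (List.mem_range.mp hj) m
  have e2 : ([i] : List Nat).filter (fun j => (2 ^ i + m).testBit j) = [i] := by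
    simp [List.filter, Nat.testBit_two_pow_add_eq, Nat.testBit_lt_two_pow h1]
  have e3 : ([i] : List Nat).filter (fun j => m.testBit j) = [] := by
    simp [List.filter, Nat.testBit_lt_two_pow h1]
  have e4 : ((List.range (n - (i + 1))).map ((i + 1) + ·)).filter (fun j => (2 ^ i + m).testBit j) = [] := by
    rw [List.filter_eq_nil_iff]
    rintro j hj
    obtain ⟨k, _, rfl⟩ := List.mem_map.mp hj
    exact hhigh _ hm2 k
  have e5 : ((List.range (n - (i + 1))).map ((i + 1) + ·)).filter (fun j => m.testBit j) = [] := by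
    rw [List.filter_eq_nil_iff]
    rintro j hj
    obtain ⟨k, _, rfl⟩ := List.mem_map.mp hj
    exact hhigh _ hm1 k
  rw [e1, e2, e3, e4, e5]
  simp

lemma pvIdx_masks (n : Nat) : ∀ i : Nat, i ≤ n →
    ((List.range (2 ^ i)).reverse).map (pvIdx n) = pvSubs i := by
  intro i
  induction i with
  | zero =>
    intro _
    simp [pvSubs, pvIdx]
  | succ i ih =>
    intro h
    have hr : List.range (2 ^ (i + 1)) = List.range (2 ^ i) ++ (List.range (2 ^ i)).map (2 ^ i + ·) := by
      rw [show 2 ^ (i + 1) = 2 ^ i + 2 ^ i by ring]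
      exact List.range_add
    rw [hr, List.reverse_append, List.map_append, ← List.map_reverse, List.map_map]
    have e1 : ((List.range (2 ^ i)).reverse).map (pvIdx n ∘ (2 ^ i + ·))
        = ((List.range (2 ^ i)).reverse).map (fun m => pvIdx n m ++ [i]) := by
      apply List.map_congr_left
      intro m hm
      have : m < 2 ^ i := List.mem_range.mp (List.mem_reverse.mp hm)
      exact pvIdx_add n i m this (by omega)
    rw [e1, show (fun m => pvIdx n m ++ [i]) = ((· ++ [i]) ∘ pvIdx n) from rfl,
      ← List.map_map, ih (by omega), pvSubs]

-- B's search = first match over pvSubs (subsets in decreasing-bitmask order)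
lemma pvAltSearch_eq (input_set : List Int) (output_state : Int) : ∀ (i : Nat) (acc : Int),
    pvAltSearch input_set output_state i acc =
      ((pvSubs i).find? (fun s => decide (pvXorAcc input_set acc s = output_state))).map
        (List.map Int.ofNat) := by
  intro i
  induction i with
  | zero =>
    intro acc
    by_cases h : acc = output_state <;> simp [pvAltSearch, pvSubs, pvXorAcc, List.find?, h]
  | succ i ih =>
    intro acc
    simp only [pvAltSearch, pvSubs, List.find?_append]
    rw [List.find?_map]
    have hmap : ((pvSubs i).find? ((fun s => decide (pvXorAcc input_set acc s = output_state)) ∘ (· ++ [i])))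
        = (pvSubs i).find? (fun s => decide (pvXorAcc input_set (PySem.Int.bxor acc (input_set.getD i 0)) s = output_state)) := by
      apply pv_find?_congr
      intro s _
      have : pvXorAcc input_set acc (s ++ [i]) =
          pvXorAcc input_set (PySem.Int.bxor acc (input_set.getD i 0)) s := by
        rw [pvXorAcc_xor]
        simp [pvXorAcc, List.foldl_append]
      simp only [Function.comp_apply]
      rw [this]
    rw [hmap, ih, ih]
    cases hfind : (pvSubs i).find? (fun s => decide (pvXorAcc input_set (PySem.Int.bxor acc (input_set.getD i 0)) s = output_state)) <;>
      simp [Option.or]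

-- A = first match over pvSubs as well
lemma pv_A_eq (input_set : List Int) (output_state : Int) :
    desired_input_set input_set output_state
      = (((pvSubs input_set.length).find?
            (fun s => decide (pvXorAcc input_set 0 s = output_state))).map
          (List.map Int.ofNat)).getD [] := by
  unfold desired_input_set
  have hfn : ∀ bit : Nat, (fun (j : Nat) => decide (bit &&& (1 <<< j) ≠ 0)) = (fun j => bit.testBit j) := by
    intro bit; funext j; exact pv_bit_eq_testBit bit j
  rw [pv_keep_last (fun bit => ((List.range input_set.length).foldl
        (fun a i => if bit &&& (1 <<< i) ≠ 0 then PySem.Int.bxor a (input_set.getD i 0) else a) 0)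
        = output_state)
      (fun bit => ((List.range input_set.length).filter
        (fun i => decide (bit &&& (1 <<< i) ≠ 0))).map Int.ofNat) [] (List.range (2 ^ input_set.length))]
  have hpred : (fun bit => decide (((List.range input_set.length).foldl
        (fun a i => if bit &&& (1 <<< i) ≠ 0 then PySem.Int.bxor a (input_set.getD i 0) else a) 0)
        = output_state))
      = (fun bit => decide (pvXorAcc input_set 0 (pvIdx input_set.length bit) = output_state)) := by
    funext bit
    congr 1
    rw [show (fun (a : Int) (i : Nat) => if bit &&& (1 <<< i) ≠ 0 then PySem.Int.bxor a (input_set.getD i 0) else a)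
          = (fun a i => if (decide (bit &&& (1 <<< i) ≠ 0)) then PySem.Int.bxor a (input_set.getD i 0) else a) by
      funext a i; by_cases h : bit &&& (1 <<< i) ≠ 0 <;> simp [h]]
    rw [pv_foldl_filter (fun i => decide (bit &&& (1 <<< i) ≠ 0))
      (fun a i => PySem.Int.bxor a (input_set.getD i 0))]
    rw [hfn bit]
    rfl
  have hf : (fun bit => ((List.range input_set.length).filter
        (fun i => decide (bit &&& (1 <<< i) ≠ 0))).map Int.ofNat)
      = (List.map Int.ofNat ∘ pvIdx input_set.length) := by
    funext bit
    simp only [Function.comp, pvIdx, hfn bit]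
  rw [hpred, hf]
  rw [show (fun bit => decide (pvXorAcc input_set 0 (pvIdx input_set.length bit) = output_state))
        = ((fun s => decide (pvXorAcc input_set 0 s = output_state)) ∘ pvIdx input_set.length) from rfl]
  rw [← Option.map_map, ← List.find?_map, pvIdx_masks input_set.length input_set.length (le_refl _)]

-- ===== VERDICT (by name: the statement is the Claim_ definition above) =====
theorem desired_input_set_spec : Claim_equal_desired_input_set := by
  intro input_set output_state _
  unfold Spec_desired_input_set desired_input_set_alt
  rw [pv_A_eq, pvAltSearch_eq]
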